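-- pv_equiv track=rewrite | github.com/bot-motherlib/TGBM | include/tgbm/api_types/def/generators/tgapi.py | get_real_field_type
-- ===== SOURCE A (Python) =====
-- def get_real_field_type(field_type):
--     types = {
--         "Integer": "INTEGER",
--         "True": "TRUE_FIELD",
--         "Boolean": "BOOLEAN",
--         "String": "STRING",
--     }
--     if field_type.startswith("Array of"):
--         field_type = f"ARRAYOF, {get_real_field_type(field_type[8:])}"
--     elif field_type in types.keys():
--         field_type = types[field_type]
--     else:
--         field_type = f"COMPOUND, {field_type}"
--     return field_type
-- ===== SOURCE B (Python) =====
-- def get_real_field_type(field_type):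
--     types = {
--         "Integer": "INTEGER",
--         "True": "TRUE_FIELD",
--         "Boolean": "BOOLEAN",
--         "String": "STRING",
--     }
--     depth = 0
--     while field_type[depth * 8 : depth * 8 + 8] == "Array of":
--         depth += 1
--     rest = field_type[depth * 8 :]
--     return depth * "ARRAYOF, " + types.get(rest, "COMPOUND, " + rest)
-- ===== Notes on version B (the rewrite author's own statement) =====
-- stated objective: alternative
-- what changed: Replaced the recursion that repeatedly slices and re-dispatches on the shrinking string by index arithmetic on the original string: a loop counts consecutive matching 8-char windows field_type[8k:8k+8], then one dict lookup with a default and one prefix repetition build the result.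
import Mathlib
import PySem

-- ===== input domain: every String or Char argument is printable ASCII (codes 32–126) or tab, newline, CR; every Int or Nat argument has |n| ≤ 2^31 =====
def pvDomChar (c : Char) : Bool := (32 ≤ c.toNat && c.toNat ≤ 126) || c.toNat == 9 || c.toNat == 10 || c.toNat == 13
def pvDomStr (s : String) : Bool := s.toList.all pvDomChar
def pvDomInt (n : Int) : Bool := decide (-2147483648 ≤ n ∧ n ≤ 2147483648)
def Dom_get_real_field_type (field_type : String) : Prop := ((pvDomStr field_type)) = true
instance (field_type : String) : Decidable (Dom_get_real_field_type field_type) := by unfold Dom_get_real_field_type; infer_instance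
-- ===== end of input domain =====

-- One line: B replaces A's recursion (which re-slices and re-dispatches on the shrinking string) by
-- index arithmetic on the ORIGINAL string — a counting scan of fixed-width 8-char windows — plus one
-- dict lookup with a default; return values proved equal (objective: simpler/alternative, not faster).

-- ===== PORT A =====
def pvPat : List Char := "Array of".toList

-- the module-level dict `types` (same literal in both Pythons)
def pvTypes : PySem.Dict (List Char) (List Char) :=
  ((((PySem.Dict.empty).insert "Integer".toList "INTEGER".toList).insert
      "True".toList "TRUE_FIELD".toList).insert
      "Boolean".toList "BOOLEAN".toList).insert
      "String".toList "STRING".toList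

-- A's recursion, step for step, over List Char
def pvGA (cs : List Char) : List Char :=
  if PySem.Chars.startswith cs pvPat then
    "ARRAYOF, ".toList ++ pvGA (PySem.List.slice cs (some 8) none)
  else
    match pvTypes.get? cs with    -- `field_type in types.keys()` then `types[field_type]`
    | some v => v
    | none => "COMPOUND, ".toList ++ cs
termination_by cs.length
decreasing_by
  rename_i h
  have hpre := (PySem.Chars.startswith_iff cs pvPat).mp h
  have hlen : 8 ≤ cs.length := by
    have := hpre.length_le; simp [pvPat] at this; omega
  have hs : PySem.List.slice cs (some 8) none = cs.drop 8 := by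
    have := PySem.List.slice_from (xs := cs) (a := 8) (by norm_num)
    simpa using this
  rw [hs]
  simp only [List.length_drop]
  omega

def get_real_field_type (field_type : String) : String :=
  String.ofList (pvGA field_type.toList)

-- ===== PORT B =====
-- the window test `field_type[depth*8 : depth*8+8] == "Array of"`, as a prefix statement
-- (needed by pvDepth's termination proof, hence stated above the port that cites it)
theorem pvWindow_iff (cs : List Char) (k : Nat) :
    PySem.List.slice cs (some ((k * 8 : Nat) : Int)) (some ((k * 8 + 8 : Nat) : Int)) = pvPat
      ↔ pvPat <+: cs.drop (k * 8) := by
  rw [PySem.List.slice_natCast]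
  have h8 : k * 8 + 8 - k * 8 = 8 := by omega
  rw [h8]
  constructor
  · intro h
    exact h ▸ List.take_prefix 8 (cs.drop (k * 8))
  · intro h
    have := List.prefix_iff_eq_take.mp h
    simpa [pvPat] using this.symm

-- B's while loop: `depth` counts consecutive matching 8-char windows of the original string
def pvDepth (cs : List Char) (k : Nat) : Nat :=
  if PySem.List.slice cs (some ((k * 8 : Nat) : Int)) (some ((k * 8 + 8 : Nat) : Int)) = pvPat then
    pvDepth cs (k + 1)
  else k
termination_by cs.length - k * 8
decreasing_by
  rename_i h
  have hp := (pvWindow_iff cs k).mp h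
  have hl := hp.length_le
  simp only [List.length_drop, pvPat] at hl
  simp at hl
  omega

def get_real_field_type_alt (field_type : String) : String :=
  let cs := field_type.toList
  let depth := pvDepth cs 0
  let rest := PySem.List.slice cs (some ((depth * 8 : Nat) : Int)) none   -- field_type[depth*8:]
  String.ofList ((List.replicate depth "ARRAYOF, ".toList).flatten        -- depth * "ARRAYOF, "
    ++ pvTypes.getD rest ("COMPOUND, ".toList ++ rest))                   -- types.get(rest, "COMPOUND, " + rest)

-- ===== PRECONDITION & SPEC =====
def Spec_get_real_field_type (field_type : String) (out : String) : Prop := out = get_real_field_type_alt field_type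
instance (field_type : String) (out : String) : Decidable (Spec_get_real_field_type field_type out) := by unfold Spec_get_real_field_type; infer_instance

-- ===== CLAIM =====
def Claim_equal_get_real_field_type : Prop := ∀ (field_type : String), Dom_get_real_field_type field_type → Spec_get_real_field_type field_type (get_real_field_type field_type)

-- ===== LEMMAS AND PROOFS =====

theorem pvDepth_ge (cs : List Char) : ∀ k, k ≤ pvDepth cs k := by
  apply pvDepth.induct cs (motive := fun k => k ≤ pvDepth cs k)
  · intro k h _
    rw [pvDepth, if_pos h]
    omega
  · intro k h
    rw [pvDepth, if_neg h]

theorem pvGA_eq_depth (cs : List Char) : ∀ k,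
    pvGA (cs.drop (k * 8)) =
      (List.replicate (pvDepth cs k - k) "ARRAYOF, ".toList).flatten ++
        (pvTypes.getD (cs.drop (pvDepth cs k * 8))
          ("COMPOUND, ".toList ++ cs.drop (pvDepth cs k * 8))) := by
  apply pvDepth.induct cs (motive := fun k =>
    pvGA (cs.drop (k * 8)) =
      (List.replicate (pvDepth cs k - k) "ARRAYOF, ".toList).flatten ++
        (pvTypes.getD (cs.drop (pvDepth cs k * 8))
          ("COMPOUND, ".toList ++ cs.drop (pvDepth cs k * 8))))
  · intro k h ih
    have hpre := (pvWindow_iff cs k).mp h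
    have hstart : PySem.Chars.startswith (cs.drop (k * 8)) pvPat :=
      (PySem.Chars.startswith_iff _ _).mpr hpre
    rw [pvGA, if_pos hstart]
    have hs : PySem.List.slice (cs.drop (k * 8)) (some 8) none = (cs.drop (k * 8)).drop 8 := by
      have := PySem.List.slice_from (xs := cs.drop (k * 8)) (a := 8) (by norm_num)
      simpa using this
    have hdrop : (cs.drop (k * 8)).drop 8 = cs.drop ((k + 1) * 8) := by
      rw [List.drop_drop]; congr 1; omega
    rw [hs, hdrop, ih]
    have hdep : pvDepth cs k = pvDepth cs (k + 1) := by
      conv_lhs => rw [pvDepth]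
      rw [if_pos h]
    rw [hdep]
    have hge : k + 1 ≤ pvDepth cs (k + 1) := pvDepth_ge cs (k + 1)
    have : pvDepth cs (k + 1) - k = (pvDepth cs (k + 1) - (k + 1)) + 1 := by omega
    rw [this, List.replicate_succ, List.flatten_cons, List.append_assoc]
  · intro k h
    have hnot : ¬ PySem.Chars.startswith (cs.drop (k * 8)) pvPat := by
      intro hc
      exact h ((pvWindow_iff cs k).mpr ((PySem.Chars.startswith_iff _ _).mp hc))
    rw [pvGA, if_neg hnot, pvDepth, if_neg h]
    simp only [Nat.sub_self, List.replicate_zero, List.flatten_nil, List.nil_append]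
    unfold PySem.Dict.getD
    cases pvTypes.get? (cs.drop (k * 8)) <;> simp

-- ===== VERDICT =====
theorem get_real_field_type_spec : Claim_equal_get_real_field_type := by
  intro s _
  unfold Spec_get_real_field_type get_real_field_type get_real_field_type_alt
  have hs : PySem.List.slice s.toList (some ((pvDepth s.toList 0 * 8 : Nat) : Int)) none
      = s.toList.drop (pvDepth s.toList 0 * 8) := PySem.List.slice_from_natCast _ _
  simp only [hs]
  have h0 := pvGA_eq_depth s.toList 0
  simp only [Nat.zero_mul, List.drop_zero, Nat.sub_zero] at h0
  rw [h0]
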